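-- pv_equiv track=rewrite | github.com/Cemag-pcp/calimag | rotinas/import_ponto_analises.py | resolve_indexes
-- ===== SOURCE A (Python) =====
-- from typing import Iterable, List, Optional, Sequence
--
-- MANDATORY_ALIASES = {
--     "sequencia": {"sequencia", "seq"},
--     "codigo": {"codigo", "instrumento", "cod"},
--     "tendencia": {"tendencia", "trend"},
--     "incerteza": {"incerteza", "certeza", "uncertainty"},
--     "data_analise": {"dataanalise", "data", "analise"},
--     "resultado": {"resultado", "result"},
-- }
--
-- OPTIONAL_ALIASES = {
--     "observacoes": {"observacoes", "obs"},
-- }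
--
-- def normalize(value: str) -> str:
--     return "".join(ch for ch in value.lower() if ch.isalnum())
--
-- def resolve_indexes(row: Sequence[str]) -> dict:
--     normalized = [normalize(cell) for cell in row]
--     indexes = {}
--     for key, aliases in {**MANDATORY_ALIASES, **OPTIONAL_ALIASES}.items():
--         idx = next((i for i, name in enumerate(normalized) if name in aliases), None)
--         if idx is not None:
--             indexes[key] = idx
--     return indexes
-- ===== SOURCE B (Python) =====
-- MANDATORY_ALIASES = {
--     "sequencia": {"sequencia", "seq"},
--     "codigo": {"codigo", "instrumento", "cod"},
--     "tendencia": {"tendencia", "trend"},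
--     "incerteza": {"incerteza", "certeza", "uncertainty"},
--     "data_analise": {"dataanalise", "data", "analise"},
--     "resultado": {"resultado", "result"},
-- }
--
-- OPTIONAL_ALIASES = {
--     "observacoes": {"observacoes", "obs"},
-- }
--
-- def normalize(value: str) -> str:
--     return "".join(ch for ch in value.lower() if ch.isalnum())
--
-- def resolve_indexes(row):
--     # One pass: first (leftmost) column index of each normalized cell name.
--     first = {}
--     for i, cell in enumerate(row):
--         first.setdefault(normalize(cell), i)
--     indexes = {}
--     for key, aliases in {**MANDATORY_ALIASES, **OPTIONAL_ALIASES}.items():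
--         hits = [first[a] for a in aliases if a in first]
--         if hits:
--             indexes[key] = min(hits)
--     return indexes
-- ===== Notes on version B (the rewrite author's own statement) =====
-- stated objective: faster
-- what changed: Instead of rescanning the normalized row once per key with next(...), B builds in one pass a dict mapping each normalized cell name to its first column index via setdefault, then takes the min index over each key's aliases present in that dict.
import Mathlib
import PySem

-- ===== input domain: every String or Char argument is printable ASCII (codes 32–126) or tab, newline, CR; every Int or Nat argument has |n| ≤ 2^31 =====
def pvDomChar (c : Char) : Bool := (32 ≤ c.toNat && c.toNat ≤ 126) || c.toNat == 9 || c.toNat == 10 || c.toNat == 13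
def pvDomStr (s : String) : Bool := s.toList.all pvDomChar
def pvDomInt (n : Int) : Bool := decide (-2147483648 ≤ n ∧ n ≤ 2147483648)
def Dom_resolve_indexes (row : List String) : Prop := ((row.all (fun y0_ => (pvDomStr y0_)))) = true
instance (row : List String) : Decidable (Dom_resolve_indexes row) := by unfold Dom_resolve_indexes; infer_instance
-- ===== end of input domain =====

-- B replaces A's per-key rescans of the row with one pass that indexes every
-- normalized cell name by its first column, then takes the min index over each key's aliases.

-- ===== PORT A =====
def normalizeCell (value : String) : String :=
  String.ofList (((PySem.Str.lower value).toList).filter (fun ch => PySem.Chars.isalnum ch))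

-- MANDATORY_ALIASES / OPTIONAL_ALIASES: dict of sets -> assoc list of lists of distinct aliases
def MANDATORY_ALIASES : List (String × List String) :=
  [("sequencia", ["sequencia", "seq"]),
   ("codigo", ["codigo", "instrumento", "cod"]),
   ("tendencia", ["tendencia", "trend"]),
   ("incerteza", ["incerteza", "certeza", "uncertainty"]),
   ("data_analise", ["dataanalise", "data", "analise"]),
   ("resultado", ["resultado", "result"])]

def OPTIONAL_ALIASES : List (String × List String) :=
  [("observacoes", ["observacoes", "obs"])]

def resolve_indexes (row : List String) : List (String × Int) :=
  let normalized := row.map normalizeCell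
  -- {**MANDATORY_ALIASES, **OPTIONAL_ALIASES}: keys disjoint, so the merge is the concatenation
  (MANDATORY_ALIASES ++ OPTIONAL_ALIASES).foldl (fun indexes ka =>
    -- next((i for i, name in enumerate(normalized) if name in aliases), None)
    match (PySem.List.enumerate normalized).find? (fun p => decide (p.2 ∈ ka.2)) with
    | some p => indexes ++ [(ka.1, p.1)]   -- keys are fresh: dict insert appends
    | none => indexes) []

-- ===== PORT B =====
def resolve_indexes_alt (row : List String) : List (String × Int) :=
  let first : PySem.Dict String Int :=
    (PySem.List.enumerate row).foldl (fun d p => d.setdefault (normalizeCell p.2) p.1) PySem.Dict.empty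
  (MANDATORY_ALIASES ++ OPTIONAL_ALIASES).foldl (fun indexes ka =>
    let hits := ka.2.filterMap (fun a => first.get? a)
    match PySem.List.min? hits (fun x => x) with
    | some m => indexes ++ [(ka.1, m)]
    | none => indexes) []

-- ===== PRECONDITION & SPEC =====
def Spec_resolve_indexes (row : List String) (out : List (String × Int)) : Prop := out = resolve_indexes_alt row
instance (row : List String) (out : List (String × Int)) : Decidable (Spec_resolve_indexes row out) := by unfold Spec_resolve_indexes; infer_instance

-- ===== CLAIM (what is proved, stated in full; the proofs are below) =====
def Claim_equal_resolve_indexes : Prop := ∀ (row : List String), Dom_resolve_indexes row → Spec_resolve_indexes row (resolve_indexes row)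

-- ===== LEMMAS AND PROOFS =====

-- first-occurrence index of name a in ys, as an offset-s column number
def fOcc (ys : List String) (s : Int) (a : String) : Option Int :=
  (PySem.List.index? ys a).map (fun k => s + (k : Int))

-- A's first-index-whose-name-is-an-alias equals B's min over the aliases' first occurrences
lemma key_eq (L ys : List String) (s : Int) :
    ((PySem.List.enumerate ys s).find? (fun p => decide (p.2 ∈ L))).map (fun p => p.1)
      = PySem.List.min? (L.filterMap (fOcc ys s)) (fun x => x) := by
  induction ys generalizing s with
  | nil =>
      have : L.filterMap (fOcc ([] : List String) s) = [] := by
        apply List.filterMap_eq_nil_iff.2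
        intro a _; simp [fOcc, PySem.List.index?_eq_idxOf?]
      rw [this, PySem.List.enumerate]
      simp [PySem.List.min?]
  | cons y ys ih =>
      rw [PySem.List.enumerate_cons]
      by_cases hy : y ∈ L
      · have hfind : List.find? (fun p => decide (p.2 ∈ L)) ((s, y) :: PySem.List.enumerate ys (s+1)) = some (s, y) :=
          List.find?_cons_of_pos (by simpa using hy)
        rw [hfind]
        have hmem : s ∈ L.filterMap (fOcc (y :: ys) s) := by
          refine List.mem_filterMap.2 ⟨y, hy, ?_⟩
          simp [fOcc, PySem.List.index?_eq_idxOf?, List.idxOf?_cons]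
        have hlb : ∀ v ∈ L.filterMap (fOcc (y :: ys) s), s ≤ v := by
          intro v hv
          obtain ⟨a, -, ha⟩ := List.mem_filterMap.1 hv
          simp only [fOcc, PySem.List.index?_eq_idxOf?] at ha
          cases hidx : List.idxOf? a (y :: ys) with
          | none => simp [hidx] at ha
          | some k => simp [hidx] at ha; omega
        cases hm : PySem.List.min? (L.filterMap (fOcc (y :: ys) s)) (fun x => x) with
        | none =>
            exact absurd ((PySem.List.min?_eq_none_iff _ _).1 hm) (List.ne_nil_of_mem hmem)
        | some m =>
            have h1 := hlb m (PySem.List.min?_mem hm)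
            have h2 := PySem.List.min?_isMin hm s hmem
            simp only [Option.map_some]
            exact congrArg some (le_antisymm h2 h1).symm
      · have hfind : List.find? (fun p => decide (p.2 ∈ L)) ((s, y) :: PySem.List.enumerate ys (s+1)) = List.find? (fun p => decide (p.2 ∈ L)) (PySem.List.enumerate ys (s+1)) :=
          List.find?_cons_of_neg (by simpa using hy)
        rw [hfind]
        rw [ih (s+1)]
        congr 1
        apply List.filterMap_congr
        intro a haL
        have hne : y ≠ a := fun h => hy (h ▸ haL)
        simp only [fOcc, PySem.List.index?_eq_idxOf?, List.idxOf?_cons]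
        rw [if_neg (by simpa using hne)]
        cases List.idxOf? a ys with
        | none => rfl
        | some k => simp; omega

-- B's setdefault pass indexes each name at its first occurrence
lemma get?_first (xs : List String) (a : String) :
    ∀ (s : Int) (d : PySem.Dict String Int),
      ((PySem.List.enumerate xs s).foldl (fun d p => d.setdefault (normalizeCell p.2) p.1) d).get? a
        = (d.get? a).or (fOcc (xs.map normalizeCell) s a) := by
  induction xs with
  | nil =>
      intro s d
      simp [PySem.List.enumerate, fOcc, PySem.List.index?_eq_idxOf?]
  | cons x xs ih =>
      intro s d
      rw [PySem.List.enumerate_cons]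
      simp only [List.foldl_cons]
      rw [ih (s+1)]
      by_cases hax : a = normalizeCell x
      · subst hax
        rw [PySem.Dict.get?_setdefault_self]
        have hocc : fOcc (normalizeCell x :: xs.map normalizeCell) s (normalizeCell x) = some s := by
          simp [fOcc, PySem.List.index?_eq_idxOf?, List.idxOf?_cons]
        simp only [List.map_cons, hocc]
        cases d.get? (normalizeCell x) <;> simp [Option.or]
      · rw [PySem.Dict.get?_setdefault_of_ne _ _ hax]
        have hshift : fOcc (normalizeCell x :: xs.map normalizeCell) s a = fOcc (xs.map normalizeCell) (s+1) a := by
          simp only [fOcc, PySem.List.index?_eq_idxOf?, List.idxOf?_cons]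
          rw [if_neg (by simpa using fun h => hax h.symm)]
          cases List.idxOf? a (xs.map normalizeCell) with
          | none => rfl
          | some k => simp; omega
        simp only [List.map_cons, hshift]

lemma main_eq (row : List String) : resolve_indexes row = resolve_indexes_alt row := by
  unfold resolve_indexes resolve_indexes_alt
  simp only []
  apply PySem.List.foldl_congr_mem
  intro acc ka _
  have hfirst : ∀ a, ((PySem.List.enumerate row).foldl (fun d p => d.setdefault (normalizeCell p.2) p.1) PySem.Dict.empty).get? a
      = fOcc (row.map normalizeCell) 0 a := by
    intro a
    rw [get?_first]
    simp [Option.or]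
  rw [List.filterMap_congr (fun a _ => hfirst a)]
  rw [← key_eq ka.2 (row.map normalizeCell) 0]
  cases (PySem.List.enumerate (row.map normalizeCell) 0).find? (fun p => decide (p.2 ∈ ka.2)) <;> simp

-- ===== VERDICT (by name: the statement is the Claim_ definition above) =====
theorem resolve_indexes_spec : Claim_equal_resolve_indexes := by
  intro row _
  unfold Spec_resolve_indexes
  exact main_eq row
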